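-- pv_equiv track=rewrite | github.com/lnk-zone/cinegraph | backend/agents/query_tools.py | _validate_cypher_syntax
-- ===== SOURCE A (Python) =====
-- def _validate_cypher_syntax(query: str) -> bool:
--     try:
--         paren = bracket = brace = 0
--         for ch in query:
--             if ch == "(":
--                 paren += 1
--             elif ch == ")":
--                 paren -= 1
--             elif ch == "[":
--                 bracket += 1
--             elif ch == "]":
--                 bracket -= 1
--             elif ch == "{":
--                 brace += 1
--             elif ch == "}":
--                 brace -= 1
--             if paren < 0 or bracket < 0 or brace < 0:
--                 return False
--         if paren != 0 or bracket != 0 or brace != 0: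
--             return False
--         query_upper = query.upper()
--         return "MATCH" in query_upper and "RETURN" in query_upper
--     except Exception:
--         return False
-- ===== SOURCE B (Python) =====
-- def _balanced(s: str, o: str, c: str) -> bool:
--     counter = 0
--     for ch in s:
--         if ch == o:
--             counter += 1
--         elif ch == c:
--             counter -= 1
--         if counter < 0:
--             return False
--     return counter == 0
--
--
-- def _validate_cypher_syntax(query: str) -> bool:
--     try:
--         upper = query.upper()
--         return (
--             _balanced(query, "(", ")")
--             and _balanced(query, "[", "]")
--             and _balanced(query, "{", "}")
--             and "MATCH" in upper
--             and "RETURN" in upper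
--         )
--     except Exception:
--         return False
-- ===== Notes on version B (the rewrite author's own statement) =====
-- stated objective: simpler
-- what changed: The single fused three-counter loop with interleaved early exits is replaced by a generic one-counter helper balanced(s,o,c) applied in three independent passes, combined with the substring checks.
import Mathlib
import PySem

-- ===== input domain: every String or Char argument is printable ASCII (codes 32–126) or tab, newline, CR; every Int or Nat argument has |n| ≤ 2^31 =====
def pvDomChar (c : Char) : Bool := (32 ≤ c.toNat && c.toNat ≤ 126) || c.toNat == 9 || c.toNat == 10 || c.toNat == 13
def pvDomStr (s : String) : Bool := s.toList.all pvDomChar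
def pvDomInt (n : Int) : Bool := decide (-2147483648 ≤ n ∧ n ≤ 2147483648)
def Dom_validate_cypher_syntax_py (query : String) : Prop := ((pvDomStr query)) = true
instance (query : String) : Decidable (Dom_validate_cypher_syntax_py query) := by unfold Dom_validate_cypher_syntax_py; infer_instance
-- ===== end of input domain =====

-- B replaces A's single fused three-counter loop by a generic one-counter helper applied in
-- three independent passes (objective: simpler). Equivalence of the return value is proved on all inputs.

-- ===== PORT A =====
-- the for-loop over query: state (paren, bracket, brace); none = early `return False`
def pvLoopA : List Char → Int → Int → Int → Option (Int × Int × Int)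
  | [], paren, bracket, brace => some (paren, bracket, brace)
  | ch :: t, paren, bracket, brace =>
    if ch == '(' then
      if paren + 1 < 0 ∨ bracket < 0 ∨ brace < 0 then none else pvLoopA t (paren + 1) bracket brace
    else if ch == ')' then
      if paren - 1 < 0 ∨ bracket < 0 ∨ brace < 0 then none else pvLoopA t (paren - 1) bracket brace
    else if ch == '[' then
      if paren < 0 ∨ bracket + 1 < 0 ∨ brace < 0 then none else pvLoopA t paren (bracket + 1) brace
    else if ch == ']' then
      if paren < 0 ∨ bracket - 1 < 0 ∨ brace < 0 then none else pvLoopA t paren (bracket - 1) brace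
    else if ch == '{' then
      if paren < 0 ∨ bracket < 0 ∨ brace + 1 < 0 then none else pvLoopA t paren bracket (brace + 1)
    else if ch == '}' then
      if paren < 0 ∨ bracket < 0 ∨ brace - 1 < 0 then none else pvLoopA t paren bracket (brace - 1)
    else
      if paren < 0 ∨ bracket < 0 ∨ brace < 0 then none else pvLoopA t paren bracket brace

def validate_cypher_syntax_py (query : String) : Bool :=
  match pvLoopA query.toList 0 0 0 with
  | none => false
  | some (paren, bracket, brace) =>
    if paren ≠ 0 ∨ bracket ≠ 0 ∨ brace ≠ 0 then false
    else
      let query_upper := PySem.Str.upper query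
      PySem.Str.isIn "MATCH" query_upper && PySem.Str.isIn "RETURN" query_upper

-- ===== PORT B =====
-- _balanced(s, o, c): one counter, early False on negative prefix, zero at the end
def pvBalancedAux : List Char → Char → Char → Int → Bool
  | [], _, _, counter => counter == 0
  | ch :: t, o, c, counter =>
    let counter := if ch == o then counter + 1 else if ch == c then counter - 1 else counter
    if counter < 0 then false else pvBalancedAux t o c counter

def validate_cypher_syntax_py_alt (query : String) : Bool :=
  let upper := PySem.Str.upper query
  pvBalancedAux query.toList '(' ')' 0 && pvBalancedAux query.toList '[' ']' 0 &&
    pvBalancedAux query.toList '{' '}' 0 &&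
    PySem.Str.isIn "MATCH" upper && PySem.Str.isIn "RETURN" upper

-- ===== PRECONDITION & SPEC =====
def Spec_validate_cypher_syntax_py (query : String) (out : Bool) : Prop := out = validate_cypher_syntax_py_alt query
instance (query : String) (out : Bool) : Decidable (Spec_validate_cypher_syntax_py query out) := by unfold Spec_validate_cypher_syntax_py; infer_instance

-- ===== CLAIM (what is proved, stated in full; the proofs are below) =====
def Claim_equal_validate_cypher_syntax_py : Prop := ∀ (query : String), Dom_validate_cypher_syntax_py query → Spec_validate_cypher_syntax_py query (validate_cypher_syntax_py query)

-- ===== LEMMAS AND PROOFS =====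

-- A's post-loop zero test, as a function of the loop's final state
def pvFinA : Option (Int × Int × Int) → Bool
  | none => false
  | some (p, b, r) => p == 0 && b == 0 && r == 0

lemma pvBal_cons_open {t : List Char} {o c : Char} {k : Int} (h : ¬ k + 1 < 0) :
    pvBalancedAux (o :: t) o c k = pvBalancedAux t o c (k + 1) := by
  simp [pvBalancedAux, h]

lemma pvBal_cons_close {t : List Char} {o c : Char} {k : Int} (hne : (c == o) = false)
    (h : ¬ k - 1 < 0) : pvBalancedAux (c :: t) o c k = pvBalancedAux t o c (k - 1) := by
  simp [pvBalancedAux, hne, h]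

lemma pvBal_cons_close_neg {t : List Char} {o c : Char} {k : Int} (hne : (c == o) = false)
    (h : k - 1 < 0) : pvBalancedAux (c :: t) o c k = false := by
  simp [pvBalancedAux, hne, h]

lemma pvBal_cons_other {t : List Char} {o c ch : Char} {k : Int} (h1 : (ch == o) = false)
    (h2 : (ch == c) = false) (h : ¬ k < 0) : pvBalancedAux (ch :: t) o c k = pvBalancedAux t o c k := by
  simp [pvBalancedAux, h1, h2, h]

-- the fused three-counter pass + zero tests equal the three independent single-counter passes
lemma pvLoop_eq_balanced (l : List Char) : ∀ (p b r : Int), 0 ≤ p → 0 ≤ b → 0 ≤ r →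
    pvFinA (pvLoopA l p b r)
    = (pvBalancedAux l '(' ')' p && pvBalancedAux l '[' ']' b && pvBalancedAux l '{' '}' r) := by
  induction l with
  | nil => intro p b r _ _ _; simp [pvLoopA, pvBalancedAux, pvFinA]
  | cons ch t ih =>
    intro p b r hp hb hr
    by_cases h1 : ch = '('
    · subst h1
      rw [show pvLoopA ('(' :: t) p b r = pvLoopA t (p + 1) b r from by
            simp [pvLoopA]; omega,
          ih _ _ _ (by omega) hb hr,
          pvBal_cons_open (by omega),
          pvBal_cons_other (by decide) (by decide) (by omega),
          pvBal_cons_other (by decide) (by decide) (by omega)]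
    · by_cases h2 : ch = ')'
      · subst h2
        by_cases hz : p - 1 < 0
        · rw [show pvLoopA (')' :: t) p b r = none from by simp [pvLoopA]; omega,
              pvBal_cons_close_neg (by decide) hz]
          simp [pvFinA]
        · rw [show pvLoopA (')' :: t) p b r = pvLoopA t (p - 1) b r from by
                simp [pvLoopA]; omega,
              ih _ _ _ (by omega) hb hr,
              pvBal_cons_close (by decide) hz,
              pvBal_cons_other (by decide) (by decide) (by omega),
              pvBal_cons_other (by decide) (by decide) (by omega)]
      · by_cases h3 : ch = '['
        · subst h3
          rw [show pvLoopA ('[' :: t) p b r = pvLoopA t p (b + 1) r from by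
                simp [pvLoopA]; omega,
              ih _ _ _ hp (by omega) hr,
              pvBal_cons_open (by omega),
              pvBal_cons_other (by decide) (by decide) (by omega),
              pvBal_cons_other (by decide) (by decide) (by omega)]
        · by_cases h4 : ch = ']'
          · subst h4
            by_cases hz : b - 1 < 0
            · rw [show pvLoopA (']' :: t) p b r = none from by simp [pvLoopA]; omega,
                  pvBal_cons_close_neg (by decide) hz]
              simp [pvFinA]
            · rw [show pvLoopA (']' :: t) p b r = pvLoopA t p (b - 1) r from by
                    simp [pvLoopA]; omega,
                  ih _ _ _ hp (by omega) hr,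
                  pvBal_cons_close (by decide) hz,
                  pvBal_cons_other (by decide) (by decide) (by omega),
                  pvBal_cons_other (by decide) (by decide) (by omega)]
          · by_cases h5 : ch = '{'
            · subst h5
              rw [show pvLoopA ('{' :: t) p b r = pvLoopA t p b (r + 1) from by
                    simp [pvLoopA]; omega,
                  ih _ _ _ hp hb (by omega),
                  pvBal_cons_open (by omega),
                  pvBal_cons_other (by decide) (by decide) (by omega),
                  pvBal_cons_other (by decide) (by decide) (by omega)]
            · by_cases h6 : ch = '}'
              · subst h6
                by_cases hz : r - 1 < 0
                · rw [show pvLoopA ('}' :: t) p b r = none from by simp [pvLoopA]; omega,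
                      pvBal_cons_close_neg (by decide) hz]
                  simp [pvFinA]
                · rw [show pvLoopA ('}' :: t) p b r = pvLoopA t p b (r - 1) from by
                        simp [pvLoopA]; omega,
                      ih _ _ _ hp hb (by omega),
                      pvBal_cons_close (by decide) hz,
                      pvBal_cons_other (by decide) (by decide) (by omega),
                      pvBal_cons_other (by decide) (by decide) (by omega)]
              · have e1 := beq_eq_false_iff_ne.mpr h1
                have e2 := beq_eq_false_iff_ne.mpr h2
                have e3 := beq_eq_false_iff_ne.mpr h3
                have e4 := beq_eq_false_iff_ne.mpr h4
                have e5 := beq_eq_false_iff_ne.mpr h5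
                have e6 := beq_eq_false_iff_ne.mpr h6
                rw [show pvLoopA (ch :: t) p b r = pvLoopA t p b r from by
                      simp [pvLoopA, e1, e2, e3, e4, e5, e6]; omega,
                    ih _ _ _ hp hb hr,
                    pvBal_cons_other e1 e2 (by omega),
                    pvBal_cons_other e3 e4 (by omega),
                    pvBal_cons_other e5 e6 (by omega)]

lemma pvFinA_match (o : Option (Int × Int × Int)) (mr : Bool) :
    (match o with
     | none => false
     | some (p, b, r) => if p ≠ 0 ∨ b ≠ 0 ∨ r ≠ 0 then false else mr)
    = (pvFinA o && mr) := by
  rcases o with _ | ⟨p, b, r⟩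
  · simp [pvFinA]
  · by_cases hp : p = 0 <;> by_cases hb : b = 0 <;> by_cases hr : r = 0 <;>
      simp [pvFinA, hp, hb, hr]

-- ===== VERDICT (by name: the statement is the Claim_ definition above) =====
theorem validate_cypher_syntax_py_spec : Claim_equal_validate_cypher_syntax_py := by
  intro query _
  unfold Spec_validate_cypher_syntax_py validate_cypher_syntax_py validate_cypher_syntax_py_alt
  rw [pvFinA_match, pvLoop_eq_balanced query.toList 0 0 0 le_rfl le_rfl le_rfl]
  simp [Bool.and_assoc]
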